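-- pv_equiv track=rewrite | github.com/malikbharat15/java-test-generator | src/test_generator/prompt_builder.py | _select_primary_type
-- ===== SOURCE A (Python) =====
-- from typing import Dict, List, Any
--
-- def _select_primary_type(detected_types: List[str]) -> str:
--     """Select primary test strategy (priority order)"""
--     priority_order = [
--         'REST_API', 'GRAPHQL', 'GRPC', 'KAFKA', 'REACTIVE',
--         'JMS', 'SCHEDULED', 'WEBSOCKET', 'SOAP', 'BATCH', 'UI', 'CLI', 'ESB'
--     ]
--
--     for ptype in priority_order:
--         if ptype in detected_types:
--             return ptype
--
--     return 'CLI'  # Fallback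
-- ===== SOURCE B (Python) =====
-- def _select_primary_type(detected_types):
--     """Select primary test strategy (priority order)"""
--     priority_order = [
--         'REST_API', 'GRAPHQL', 'GRPC', 'KAFKA', 'REACTIVE',
--         'JMS', 'SCHEDULED', 'WEBSOCKET', 'SOAP', 'BATCH', 'UI', 'CLI', 'ESB'
--     ]
--     rank = {t: i for i, t in enumerate(priority_order)}
--     sentinel = len(priority_order)
--     best_rank = sentinel
--     best = 'CLI'
--     for t in detected_types:
--         r = rank.get(t, sentinel)
--         if r < best_rank:
--             best_rank = r
--             best = t
--     return best
-- ===== Notes on version B (the rewrite author's own statement) =====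
-- stated objective: faster
-- what changed: B inverts the traversal: instead of scanning the fixed priority list and testing membership in the input for each entry, B builds a rank index once and makes a single pass over the input keeping the element of minimal rank, falling back to 'CLI'.
import Mathlib
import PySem

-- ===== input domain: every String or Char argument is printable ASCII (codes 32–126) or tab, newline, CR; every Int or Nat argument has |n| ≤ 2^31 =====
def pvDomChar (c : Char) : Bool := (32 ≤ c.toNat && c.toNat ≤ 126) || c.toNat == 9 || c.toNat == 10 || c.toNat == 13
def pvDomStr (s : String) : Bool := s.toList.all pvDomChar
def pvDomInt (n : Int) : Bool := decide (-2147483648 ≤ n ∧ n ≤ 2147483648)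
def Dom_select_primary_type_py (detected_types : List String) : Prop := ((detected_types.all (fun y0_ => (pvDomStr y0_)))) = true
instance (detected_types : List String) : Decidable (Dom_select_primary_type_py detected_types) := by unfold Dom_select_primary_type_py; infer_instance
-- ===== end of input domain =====

-- B inverts the traversal (rank index + one pass over the input, keeping the minimal-rank element) instead of A's scan of the fixed priority list; same results; a timing run measured B faster (single pass, O(1) rank lookups).

-- ===== PORT A =====
def pvPrioA : List String :=
  ["REST_API", "GRAPHQL", "GRPC", "KAFKA", "REACTIVE",
   "JMS", "SCHEDULED", "WEBSOCKET", "SOAP", "BATCH", "UI", "CLI", "ESB"]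

-- A's 'for ptype in priority_order' loop with early return
def pvALoop (priority detected_types : List String) : String :=
  match priority with
  | [] => "CLI"  -- fallback
  | p :: ps => if p ∈ detected_types then p else pvALoop ps detected_types

def select_primary_type_py (detected_types : List String) : String :=
  pvALoop pvPrioA detected_types

-- ===== PORT B =====
def pvPrioB : List String :=
  ["REST_API", "GRAPHQL", "GRPC", "KAFKA", "REACTIVE",
   "JMS", "SCHEDULED", "WEBSOCKET", "SOAP", "BATCH", "UI", "CLI", "ESB"]

-- rank = {t: i for i, t in enumerate(priority_order)}
def pvRank : PySem.Dict String Int :=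
  (PySem.List.enumerate pvPrioB 0).foldl (fun d it => d.insert it.2 it.1) PySem.Dict.empty

-- B's 'for t in detected_types' loop; sentinel = len(priority_order) = 13
def pvBLoop (ts : List String) (bestRank : Int) (best : String) : String :=
  match ts with
  | [] => best
  | t :: rest =>
      let r := pvRank.getD t 13
      if r < bestRank then pvBLoop rest r t else pvBLoop rest bestRank best

def select_primary_type_py_alt (detected_types : List String) : String :=
  pvBLoop detected_types 13 "CLI"

-- ===== PRECONDITION & SPEC =====
def Spec_select_primary_type_py (detected_types : List String) (out : String) : Prop := out = select_primary_type_py_alt detected_types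
instance (detected_types : List String) (out : String) : Decidable (Spec_select_primary_type_py detected_types out) := by unfold Spec_select_primary_type_py; infer_instance

-- ===== CLAIM (what is proved, stated in full; the proofs are below) =====
def Claim_equal_select_primary_type_py : Prop := ∀ (detected_types : List String), Dom_select_primary_type_py detected_types → Spec_select_primary_type_py detected_types (select_primary_type_py detected_types)

-- ===== LEMMAS AND PROOFS =====

-- rank of a string: its index in the priority list, 13 if absent
def pvRk (s : String) : Nat := pvPrioA.idxOf s

-- running minimum of ranks, as B's loop maintains it
def pvFm (d : List String) (a : Nat) : Nat := d.foldl (fun m t => min m (pvRk t)) a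

-- the common result shape: priority[m] when m < 13, else the fallback
def pvRes (m : Nat) : String :=
  if h : m < 13 then pvPrioA[m]'(by simpa [pvPrioA] using h) else "CLI"

lemma pvRank_eq : pvRank = PySem.Dict.mk [("REST_API",(0:Int)),("GRAPHQL",1),("GRPC",2),("KAFKA",3),("REACTIVE",4),("JMS",5),("SCHEDULED",6),("WEBSOCKET",7),("SOAP",8),("BATCH",9),("UI",10),("CLI",11),("ESB",12)] := by
  decide

-- B's dict lookup with default 13 IS the priority index pvRk
lemma pvRank_getD (t : String) : pvRank.getD t 13 = ((pvRk t : Nat) : Int) := by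
  rw [pvRank_eq]
  by_cases h0 : t = "REST_API"
  · subst h0; decide
  by_cases h1 : t = "GRAPHQL"
  · subst h1; decide
  by_cases h2 : t = "GRPC"
  · subst h2; decide
  by_cases h3 : t = "KAFKA"
  · subst h3; decide
  by_cases h4 : t = "REACTIVE"
  · subst h4; decide
  by_cases h5 : t = "JMS"
  · subst h5; decide
  by_cases h6 : t = "SCHEDULED"
  · subst h6; decide
  by_cases h7 : t = "WEBSOCKET"
  · subst h7; decide
  by_cases h8 : t = "SOAP"
  · subst h8; decide
  by_cases h9 : t = "BATCH"
  · subst h9; decide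
  by_cases h10 : t = "UI"
  · subst h10; decide
  by_cases h11 : t = "CLI"
  · subst h11; decide
  by_cases h12 : t = "ESB"
  · subst h12; decide
  simp [PySem.Dict.getD, PySem.Dict.get?, pvRk, pvPrioA,
    Ne.symm h0, Ne.symm h1, Ne.symm h2, Ne.symm h3, Ne.symm h4, Ne.symm h5, Ne.symm h6,
    Ne.symm h7, Ne.symm h8, Ne.symm h9, Ne.symm h10, Ne.symm h11, Ne.symm h12]

lemma pvRk_lt (t : String) (h : pvRk t < 13) :
    pvPrioA[pvRk t]'(by simpa [pvPrioA] using h) = t := by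
  have hlen : pvRk t < pvPrioA.length := by simpa [pvPrioA] using h
  exact List.getElem_idxOf hlen

lemma pvRk_getElem (i : Nat) (h : i < 13) :
    pvRk (pvPrioA[i]'(by simpa [pvPrioA] using h)) = i :=
  List.Nodup.idxOf_getElem (by decide) _ _

lemma pvFm_le (d : List String) (a : Nat) : pvFm d a ≤ a := by
  induction d generalizing a with
  | nil => simp [pvFm]
  | cons t ts ih =>
    have := ih (min a (pvRk t))
    simp only [pvFm, List.foldl_cons] at *
    omega

lemma pvFm_le_rk (d : List String) (a : Nat) (t : String) (ht : t ∈ d) : pvFm d a ≤ pvRk t := by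
  induction d generalizing a with
  | nil => simp at ht
  | cons u us ih =>
    simp only [pvFm, List.foldl_cons]
    rcases List.mem_cons.mp ht with h | h
    · subst h
      have := pvFm_le us (min a (pvRk t))
      simp only [pvFm] at this
      omega
    · exact ih _ h

lemma pvFm_achieved (d : List String) (a : Nat) : pvFm d a = a ∨ ∃ t ∈ d, pvFm d a = pvRk t := by
  induction d generalizing a with
  | nil => left; simp [pvFm]
  | cons u us ih =>
    simp only [pvFm, List.foldl_cons]
    rcases ih (min a (pvRk u)) with h | ⟨t, ht, hEq⟩
    · simp only [pvFm] at h
      by_cases hle : a ≤ pvRk u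
      · left; rw [h]; omega
      · right; exact ⟨u, List.mem_cons_self .., by rw [h]; omega⟩
    · right; exact ⟨t, List.mem_cons_of_mem _ ht, hEq⟩

-- invariant of B's loop: the state is always (running min, pvRes of it)
lemma pvBLoop_eq (d : List String) : ∀ (br : Nat) (b : String), br ≤ 13 → b = pvRes br →
    pvBLoop d (br : Int) b = pvRes (pvFm d br) := by
  induction d with
  | nil =>
    intro br b _ hb
    simpa [pvBLoop, pvFm] using hb
  | cons t ts ih =>
    intro br b hbr hb
    simp only [pvBLoop, pvRank_getD]
    split_ifs with h
    · have hlt : pvRk t < br := by exact_mod_cast h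
      have hmin : min br (pvRk t) = pvRk t := by omega
      have hres : t = pvRes (pvRk t) := by
        rw [pvRes, dif_pos (by omega)]
        exact (pvRk_lt t (by omega)).symm
      have := ih (pvRk t) t (by omega) hres
      simpa [pvFm, hmin] using this
    · have hge : br ≤ pvRk t := by
        by_contra hc
        exact h (by exact_mod_cast (by omega : pvRk t < br))
      have hmin : min br (pvRk t) = br := by omega
      have := ih br b hbr hb
      simpa [pvFm, hmin] using this

-- A's loop returns the first priority entry present in d
lemma pvALoop_eq_of (l d : List String) (m : Nat) (hm : m < l.length)
    (hmem : l[m] ∈ d) (hnot : ∀ i (h : i < m), l[i]'(by omega) ∉ d) :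
    pvALoop l d = l[m] := by
  induction l generalizing m with
  | nil => simp at hm
  | cons p ps ih =>
    cases m with
    | zero =>
      simp only [List.getElem_cons_zero] at hmem ⊢
      simp [pvALoop, hmem]
    | succ m' =>
      have hp : p ∉ d := hnot 0 (by omega)
      simp only [pvALoop, if_neg hp]
      have := ih m' (by simpa using hm) (by simpa using hmem)
        (fun i hi => by simpa using hnot (i+1) (by omega))
      simpa using this

lemma pvALoop_none (l d : List String) (h : ∀ p ∈ l, p ∉ d) : pvALoop l d = "CLI" := by
  induction l with
  | nil => rfl
  | cons p ps ih =>
    simp only [pvALoop, if_neg (h p (List.mem_cons_self ..))]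
    exact ih fun q hq => h q (List.mem_cons_of_mem _ hq)

-- ===== VERDICT (by name: the statement is the Claim_ definition above) =====
theorem select_primary_type_py_spec : Claim_equal_select_primary_type_py := by
  intro d _
  show select_primary_type_py d = select_primary_type_py_alt d
  unfold select_primary_type_py select_primary_type_py_alt
  have hb := pvBLoop_eq d 13 "CLI" (le_refl _) (by simp [pvRes])
  rw [show ((13:Nat):Int) = 13 by norm_num] at hb
  rw [hb]
  by_cases hlt : pvFm d 13 < 13
  · rcases pvFm_achieved d 13 with h | ⟨t, ht, hEq⟩
    · omega
    · have hrk : pvRk t < 13 := by omega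
      have hmem : pvPrioA[pvFm d 13]'(by simpa [pvPrioA] using hlt) ∈ d := by
        rw [getElem_congr rfl hEq (by simpa [pvPrioA] using hlt), pvRk_lt t hrk]
        exact ht
      rw [pvALoop_eq_of pvPrioA d (pvFm d 13) (by simpa [pvPrioA] using hlt) hmem ?hnot]
      · rw [pvRes, dif_pos hlt]
      case hnot =>
        intro i hi hin
        have h1 := pvFm_le_rk d 13 _ hin
        have h2 : pvRk (pvPrioA[i]'(by simp [pvPrioA]; omega)) = i := pvRk_getElem i (by omega)
        omega
  · rw [pvALoop_none pvPrioA d ?hn, pvRes, dif_neg hlt]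
    case hn =>
      intro p hp hpd
      have hpk : pvRk p < 13 := by
        have := List.idxOf_lt_length_of_mem hp
        simpa [pvRk, pvPrioA] using this
      have := pvFm_le_rk d 13 p hpd
      omega
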